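-- pv_equiv track=rewrite | github.com/navaneethakumar-balasubramanian/dcrhino_lib | dcrhino3/helpers/general_helper_functions.py | StandardString
-- ===== SOURCE A (Python) =====
-- def StandardString(s):
--     """
--     historical method from SEGY-land
--     Parameters:
--         s (str): string to be standardized
--
--     Returns:
--         (str): cleaned, standardized string with underscores instead of spaces
--     """
--     s = str(s).replace("_"," ")
--     components = s.split(" ")
--     clean_components=[]
--     string=""
--     for ch in components:
--         word = ''.join(e for e in ch if (e.isalnum() or (e in ['&','.'])))
--         clean_components.append(word)
--     for i,c in enumerate(clean_components):
--         string += c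
--         if i<len(clean_components)-1:
--             string+= "_"
--     return string.upper()
-- ===== SOURCE B (Python) =====
-- def StandardString(s):
--     """Single pass over the characters: one underscore per separator; keep alphanumerics, ampersand and dot uppercased; drop the rest."""
--     out = []
--     for ch in str(s):
--         if ch == " " or ch == "_":
--             out.append("_")
--         elif ch.isalnum() or ch == "&" or ch == ".":
--             out.append(ch.upper())
--     return "".join(out)
-- ===== Notes on version B (the rewrite author's own statement) =====
-- stated objective: simpler
-- what changed: Replaced the replace/split/filter/join-with-enumerate pipeline by a single character-by-character pass that emits an underscore for each separator and the uppercased kept character, with no intermediate token lists.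
import Mathlib
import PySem

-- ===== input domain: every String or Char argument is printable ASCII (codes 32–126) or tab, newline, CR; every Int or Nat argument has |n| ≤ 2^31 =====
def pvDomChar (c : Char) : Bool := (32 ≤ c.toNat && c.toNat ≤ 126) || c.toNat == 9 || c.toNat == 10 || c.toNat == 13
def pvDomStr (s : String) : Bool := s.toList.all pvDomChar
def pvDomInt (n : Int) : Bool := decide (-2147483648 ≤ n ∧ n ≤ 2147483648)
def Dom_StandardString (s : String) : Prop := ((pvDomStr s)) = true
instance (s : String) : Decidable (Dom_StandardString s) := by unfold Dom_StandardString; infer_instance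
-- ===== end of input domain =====

-- B replaces A's replace/split/filter/join-with-enumerate pipeline by one character-by-character pass
-- (objective: simpler; same O(n) cost).

-- ===== PORT A =====
def StandardString (s : String) : String :=
  -- s = str(s).replace("_", " ")
  let s1 : List Char := PySem.Chars.replace s.toList ['_'] [' ']
  -- components = s.split(" ")  (sep nonempty, so split? is some)
  let components : List (List Char) := (PySem.Chars.split? s1 [' ']).getD []
  -- for ch in components: word = ''.join(e for e in ch if e.isalnum() or e in ['&','.'])
  let cleanComponents : List (List Char) :=
    components.map (fun ch => ch.filter (fun e => PySem.Chars.isalnum e || e == '&' || e == '.'))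
  -- for i, c in enumerate(clean_components): string += c; if i < len-1: string += "_"
  let str : List Char := (PySem.List.enumerate cleanComponents).foldl
    (fun acc p =>
      let acc2 := acc ++ p.2
      if p.1 < (cleanComponents.length : Int) - 1 then acc2 ++ ['_'] else acc2) []
  -- return string.upper()
  String.mk (PySem.Chars.upper str)

-- ===== PORT B =====
def StandardString_alt (s : String) : String :=
  String.mk (s.toList.foldl
    (fun acc c =>
      if c == ' ' || c == '_' then acc ++ ['_']
      else if PySem.Chars.isalnum c || c == '&' || c == '.' then acc ++ [PySem.Chars.upperChar c]
      else acc) [])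

-- ===== PRECONDITION & SPEC =====
def Spec_StandardString (s : String) (out : String) : Prop := out = StandardString_alt s
instance (s : String) (out : String) : Decidable (Spec_StandardString s out) := by unfold Spec_StandardString; infer_instance

-- ===== CLAIM (what is proved, stated in full; the proofs are below) =====
def Claim_equal_StandardString : Prop := ∀ (s : String), Dom_StandardString s → Spec_StandardString s (StandardString s)

-- ===== LEMMAS AND PROOFS =====

def pvKeep (c : Char) : Bool := PySem.Chars.isalnum c || c == '&' || c == '.'

def pvSub (c : Char) : Char := if c == '_' then ' ' else c

/-- a direct recursion for split-on-one-space -/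
def pvSplitSp : List Char → List (List Char)
  | [] => [[]]
  | c :: cs => if c == ' ' then [] :: pvSplitSp cs else (pvSplitSp cs).modifyHead (c :: ·)

/-- the common single-pass form both ports reduce to -/
def pvF : List Char → List Char
  | [] => []
  | c :: cs =>
    if c == ' ' || c == '_' then '_' :: pvF cs
    else if pvKeep c then PySem.Chars.upperChar c :: pvF cs
    else pvF cs

theorem pv_replace_go (fuel : Nat) :
    ∀ (l acc : List Char), l.length ≤ fuel →
      PySem.Chars.replace.go ['_'] [' '] fuel l acc = acc.reverse ++ l.map pvSub := by
  induction fuel with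
  | zero =>
    intro l acc h
    have : l = [] := List.length_eq_zero_iff.mp (Nat.le_zero.mp h)
    subst this; simp [PySem.Chars.replace.go]
  | succ n ih =>
    intro l acc h
    cases l with
    | nil => simp [PySem.Chars.replace.go]
    | cons c t =>
      by_cases hc : c = '_'
      · subst hc
        have hp : List.isPrefixOf ['_'] ('_' :: t) = true := by
          simp [List.isPrefixOf]
        simp only [PySem.Chars.replace.go, hp, if_pos]
        rw [ih _ _ (by simpa using Nat.le_of_succ_le_succ h)]
        simp [pvSub]
      · have hp : List.isPrefixOf ['_'] (c :: t) = false := by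
          simp [List.isPrefixOf]; exact fun h' => hc h'.symm
        simp only [PySem.Chars.replace.go, hp]
        rw [if_neg (by simp)]
        rw [ih _ _ (by simpa using Nat.le_of_succ_le_succ h)]
        simp [pvSub, hc]

theorem pv_replace_eq (cs : List Char) :
    PySem.Chars.replace cs ['_'] [' '] = cs.map pvSub := by
  have h : (['_'] : List Char).isEmpty = false := rfl
  simp only [PySem.Chars.replace, h, Bool.false_eq_true, if_false]
  exact pv_replace_go cs.length cs [] (le_refl _)

theorem pvSplitSp_ne_nil (cs : List Char) : pvSplitSp cs ≠ [] := by
  induction cs with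
  | nil => simp [pvSplitSp]
  | cons c t ih =>
    simp only [pvSplitSp]
    split_ifs
    · simp
    · cases h : pvSplitSp t with
      | nil => exact absurd h ih
      | cons a b => simp [List.modifyHead]

theorem pv_splitOn_go (fuel : Nat) :
    ∀ (l cur : List Char) (acc : List (List Char)), l.length < fuel →
      PySem.Chars.splitOn.go [' '] fuel l cur acc
        = acc.reverse ++ (pvSplitSp l).modifyHead (cur.reverse ++ ·) := by
  induction fuel with
  | zero => intro l cur acc h; omega
  | succ n ih =>
    intro l cur acc h
    cases l with
    | nil => simp [PySem.Chars.splitOn.go, pvSplitSp, List.modifyHead]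
    | cons c t =>
      by_cases hc : c = ' '
      · subst hc
        have hp : List.isPrefixOf [' '] (' ' :: t) = true := by simp [List.isPrefixOf]
        simp only [PySem.Chars.splitOn.go, hp, if_pos]
        rw [ih _ _ _ (by simpa using Nat.lt_of_succ_lt_succ h)]
        simp [pvSplitSp, List.modifyHead]
        cases hS : pvSplitSp t with
        | nil => exact absurd hS (pvSplitSp_ne_nil t)
        | cons a b => simp [List.modifyHead]
      · have hp : List.isPrefixOf [' '] (c :: t) = false := by
          simp [List.isPrefixOf]; exact fun h' => hc h'.symm
        simp only [PySem.Chars.splitOn.go, hp]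
        rw [if_neg (by simp)]
        rw [ih _ _ _ (by simpa using Nat.lt_of_succ_lt_succ h)]
        simp only [pvSplitSp, if_neg (by simp [hc] : ¬ (c == ' ') = true)]
        cases hS : pvSplitSp t with
        | nil => exact absurd hS (pvSplitSp_ne_nil t)
        | cons a b => simp [List.modifyHead]

theorem pv_splitOn_eq (cs : List Char) :
    PySem.Chars.splitOn cs [' '] = pvSplitSp cs := by
  have := pv_splitOn_go (cs.length + 1) cs [] [] (Nat.lt_succ_self _)
  simp only [PySem.Chars.splitOn] at *
  rw [this]
  cases h : pvSplitSp cs with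
  | nil => exact absurd h (pvSplitSp_ne_nil cs)
  | cons a b => simp [List.modifyHead]

/-- join with a one-char separator, pulling a cons out of the head piece -/
theorem pv_join_cons_head (c : Char) (p : List Char) (rest : List (List Char)) :
    PySem.Chars.join ['_'] ((c :: p) :: rest) = c :: PySem.Chars.join ['_'] (p :: rest) := by
  cases rest with
  | nil => simp [PySem.Chars.join_singleton]
  | cons q r => simp [PySem.Chars.join_cons_cons]

theorem pv_join_nil_head (rest : List (List Char)) (h : rest ≠ []) :
    PySem.Chars.join ['_'] ([] :: rest) = '_' :: PySem.Chars.join ['_'] rest := by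
  cases rest with
  | nil => exact absurd rfl h
  | cons q r => simp [PySem.Chars.join_cons_cons]

/-- A's pipeline (before upper) computes the single-pass recursion with raw kept chars -/
def pvG : List Char → List Char
  | [] => []
  | c :: cs =>
    if c == ' ' || c == '_' then '_' :: pvG cs
    else if pvKeep c then c :: pvG cs
    else pvG cs

theorem pv_pipeline_eq (cs : List Char) :
    PySem.Chars.join ['_']
      ((pvSplitSp (cs.map pvSub)).map
        (fun ch => ch.filter (fun e => PySem.Chars.isalnum e || e == '&' || e == '.'))) = pvG cs := by
  have hfun : (fun ch : List Char => ch.filter (fun e => PySem.Chars.isalnum e || e == '&' || e == '.'))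
      = List.filter pvKeep := funext fun ch => rfl
  rw [hfun]
  induction cs with
  | nil => simp [pvSplitSp, pvG, PySem.Chars.join_singleton]
  | cons c t ih =>
    by_cases hsep : c = ' ' ∨ c = '_'
    · have hsub : pvSub c = ' ' := by rcases hsep with h | h <;> subst h <;> simp [pvSub]
      have hsp : pvSplitSp ((c :: t).map pvSub) = [] :: pvSplitSp (t.map pvSub) := by
        rw [List.map_cons, hsub]; simp [pvSplitSp]
      rw [hsp, List.map_cons, List.filter_nil]
      rw [pv_join_nil_head _ (by
        intro h
        exact pvSplitSp_ne_nil _ (List.map_eq_nil_iff.mp h))]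
      rw [ih]
      have hc : (c == ' ' || c == '_') = true := by
        rcases hsep with h | h <;> subst h <;> simp
      simp [pvG, hc]
    · push_neg at hsep
      have hsub : pvSub c = c := by simp [pvSub, hsep.2]
      have hcs : (c == ' ') = false := by simp [hsep.1]
      cases hS : pvSplitSp (t.map pvSub) with
      | nil => exact absurd hS (pvSplitSp_ne_nil _)
      | cons a b =>
        have hsp : pvSplitSp ((c :: t).map pvSub) = (c :: a) :: b := by
          rw [List.map_cons, hsub]
          simp [pvSplitSp, hcs, hS, List.modifyHead]
        rw [hS] at ih
        rw [hsp]
        have hg : pvG (c :: t) = if pvKeep c then c :: pvG t else pvG t := by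
          simp [pvG, hsep.1, hsep.2]
        rw [hg, ← ih, List.map_cons]
        by_cases hk : pvKeep c = true
        · rw [List.filter_cons_of_pos hk, pv_join_cons_head]
          simp [hk]
        · rw [List.filter_cons_of_neg (by simpa using hk)]
          simp [hk]

theorem pv_upper_pvG (cs : List Char) :
    PySem.Chars.upper (pvG cs) = pvF cs := by
  induction cs with
  | nil => simp [pvG, pvF, PySem.Chars.upper]
  | cons c t ih =>
    simp only [pvG, pvF]
    split_ifs with h1 h2
    · simp only [PySem.Chars.upper, List.map_cons] at *
      rw [show PySem.Chars.upperChar '_' = '_' from by decide]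
      simpa [PySem.Chars.upper] using congrArg (List.cons '_') ih
    · simp only [PySem.Chars.upper, List.map_cons] at *
      simpa [PySem.Chars.upper] using congrArg (List.cons (PySem.Chars.upperChar c)) ih
    · exact ih

/-- the enumerate/foldl join loop of A builds join with '_' -/
theorem pv_enum_join (n : Int) :
    ∀ (L : List (List Char)) (k : Int) (acc : List Char), k + L.length = n →
      (PySem.List.enumerate L k).foldl
        (fun acc p =>
          let acc2 := acc ++ p.2
          if p.1 < n - 1 then acc2 ++ ['_'] else acc2) acc
      = acc ++ PySem.Chars.join ['_'] L := by
  intro L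
  induction L with
  | nil => intro k acc _; simp [PySem.List.enumerate_nil, PySem.Chars.join_nil]
  | cons x xs ih =>
    intro k acc hk
    rw [PySem.List.enumerate_cons, List.foldl_cons]
    cases xs with
    | nil =>
      have : ¬ (k < n - 1) := by simp at hk; omega
      simp only [if_neg this, PySem.List.enumerate_nil, List.foldl_nil,
        PySem.Chars.join_singleton]
    | cons y ys =>
      have hlt : k < n - 1 := by
        simp [List.length_cons] at hk
        omega
      simp only [if_pos hlt]
      rw [ih (k + 1) _ (by simp at hk ⊢; omega)]
      rw [PySem.Chars.join_cons_cons]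
      simp

theorem pv_B_fold (cs : List Char) :
    ∀ acc : List Char,
      cs.foldl
        (fun acc c =>
          if c == ' ' || c == '_' then acc ++ ['_']
          else if PySem.Chars.isalnum c || c == '&' || c == '.' then acc ++ [PySem.Chars.upperChar c]
          else acc) acc = acc ++ pvF cs := by
  induction cs with
  | nil => intro acc; simp [pvF]
  | cons c t ih =>
    intro acc
    simp only [List.foldl_cons, pvF, pvKeep]
    split_ifs with h1 h2
    · rw [ih]; simp
    · rw [ih]; simp
    · exact ih acc

-- ===== VERDICT (by name: the statement is the Claim_ definition above) =====
theorem StandardString_spec : Claim_equal_StandardString := by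
  intro s _
  unfold Spec_StandardString StandardString StandardString_alt
  simp only [PySem.Chars.split?, List.isEmpty_cons, Bool.false_eq_true, if_false, Option.getD_some]
  rw [pv_replace_eq, pv_splitOn_eq]
  rw [pv_enum_join _ _ 0 [] (by simp)]
  rw [List.nil_append, pv_pipeline_eq, pv_upper_pvG]
  rw [pv_B_fold s.toList []]
  rw [List.nil_append]
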